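-- pv_equiv track=rewrite | github.com/TinyAtoms/projecteuler | 68.py | generate_solutionset
-- ===== SOURCE A (Python) =====
-- from itertools import combinations, chain
-- from collections import defaultdict, Counter
--
-- def generate_solutionset(n):
--
--     nums = [i for i in range(1,2 * n + 1)]
--
--     solution = defaultdict(list)
--
--     for c in combinations(nums, 3):
--         csum = sum(c)
--         cstring = [i for i in c][::-1]
--         solution[csum].append(cstring)
--     popped = []
--     for k,v in solution.items():
--         if len(v) < n:
--             popped.append(k)
--     for k in popped:
--         solution.pop(k)
--     return solution
-- ===== SOURCE B (Python) =====
-- from collections import defaultdict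
--
--
-- def generate_solutionset(n):
--     # Direct construction: iterate over each possible triple sum s and build its
--     # group arithmetically (c is determined by s, a, b), keeping s only when the
--     # group has at least n triples.  No combinations enumeration, no grouping
--     # dict that is later pruned.
--     top = 2 * n
--     solution = defaultdict(list)
--     for s in range(6, 6 * n - 2):
--         triples = [[s - a - b, b, a]
--                    for a in range(1, top + 1)
--                    for b in range(a + 1, top + 1)
--                    if b < s - a - b <= top]
--         if len(triples) >= n:
--             solution[s] = triples
--     return solution
-- ===== Notes on version B (the rewrite author's own statement) =====
-- stated objective: alternative
-- what changed: A enumerates all 3-combinations of 1..2n, groups them by sum into a dict and then pops the infrequent keys; B never enumerates combinations: it iterates directly over every possible sum s in [6, 6n-3], constructs s's group arithmetically (c = s-a-b determined from a and b) and inserts the group only when it has at least n triples.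
import Mathlib
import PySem

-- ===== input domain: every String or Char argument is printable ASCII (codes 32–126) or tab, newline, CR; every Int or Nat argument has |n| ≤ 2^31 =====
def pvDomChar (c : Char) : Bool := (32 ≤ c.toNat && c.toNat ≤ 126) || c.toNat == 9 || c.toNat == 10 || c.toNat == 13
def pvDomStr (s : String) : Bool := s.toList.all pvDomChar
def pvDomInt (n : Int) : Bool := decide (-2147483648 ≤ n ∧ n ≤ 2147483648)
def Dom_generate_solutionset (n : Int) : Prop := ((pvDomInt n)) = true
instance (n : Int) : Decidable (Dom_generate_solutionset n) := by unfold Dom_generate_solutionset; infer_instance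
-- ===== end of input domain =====

-- B builds each sum's group directly (c = s - a - b) instead of enumerating and grouping
-- all 3-combinations and popping infrequent keys (objective: alternative).

-- ===== PORT A =====
-- `c[::-1]` never raises (step -1 ≠ 0), so the `.getD []` below is unreachable;
-- `solution.pop(k)` is only called on keys of `solution`, so it never raises and acts as `erase`.
def generate_solutionset (n : Int) : List (Int × List (List Int)) :=
  let nums := PySem.List.pyRange 1 (2 * n + 1) 1
  let solution := (PySem.List.combinations nums 3).foldl
    (fun d c => d.modify c.sum [] (· ++ [(PySem.List.slice? c none none (-1)).getD []]))
    PySem.Dict.empty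
  let popped := solution.items.foldl
    (fun acc kv => if (kv.2.length : Int) < n then acc ++ [kv.1] else acc) []
  (popped.foldl (fun d k => d.erase k) solution).items

-- ===== PORT B =====
def generate_solutionset_alt (n : Int) : List (Int × List (List Int)) :=
  let top := 2 * n
  let solution := (PySem.List.pyRange 6 (6 * n - 2) 1).foldl
    (fun d s =>
      let triples := (PySem.List.pyRange 1 (top + 1) 1).flatMap (fun a =>
        (PySem.List.pyRange (a + 1) (top + 1) 1).flatMap (fun b =>
          if b < s - a - b ∧ s - a - b ≤ top then [[s - a - b, b, a]] else []))
      if n ≤ (triples.length : Int) then d.insert s triples else d)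
    PySem.Dict.empty
  solution.items

-- ===== PRECONDITION & SPEC =====
def Spec_generate_solutionset (n : Int) (out : List (Int × List (List Int))) : Prop := out = generate_solutionset_alt n
instance (n : Int) (out : List (Int × List (List Int))) : Decidable (Spec_generate_solutionset n out) := by unfold Spec_generate_solutionset; infer_instance

-- ===== CLAIM (what is proved, stated in full; the proofs are below) =====
def Claim_equal_generate_solutionset : Prop := ∀ (n : Int), Dom_generate_solutionset n → Spec_generate_solutionset n (generate_solutionset n)

-- ===== LEMMAS AND PROOFS =====

-- naming: cs = combinations of [1, 2n], sums = their sums, S = Set.ofList sums,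
-- T n s = B's arithmetically built group for sum s, G cs s = A's group for sum s.
def pvT (n s : Int) : List (List Int) :=
  (PySem.List.pyRange 1 (2 * n + 1) 1).flatMap (fun a =>
    (PySem.List.pyRange (a + 1) (2 * n + 1) 1).flatMap (fun b =>
      if b < s - a - b ∧ s - a - b ≤ 2 * n then [[s - a - b, b, a]] else []))

def pvG (cs : List (List Int)) (s : Int) : List (List Int) :=
  (cs.filter (fun c => c.sum == s)).map List.reverse

-- ---- A-side shape lemmas (dict built, then keys popped) ----

theorem pv_items_erase {ν : Type} (d : PySem.Dict Int ν) (k : Int) :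
    (d.erase k).items = d.items.filter (fun kv => kv.1 != k) := rfl

theorem pv_items_foldl_erase {ν : Type} (ks : List Int) (d : PySem.Dict Int ν) :
    (ks.foldl (fun d k => d.erase k) d).items
      = d.items.filter (fun kv => !ks.contains kv.1) := by
  induction ks generalizing d with
  | nil => simp
  | cons k ks ih =>
      simp only [List.foldl_cons, ih, pv_items_erase, List.filter_filter]
      apply List.filter_congr
      intro kv _
      simp only [List.contains_cons, Bool.not_or]
      cases h : kv.1 == k <;> simp [bne, h]

theorem pv_getD_group {β : Type} (l : List β) (key : β → Int) (val : β → List Int)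
    (d : PySem.Dict Int (List (List Int))) (k : Int) :
    (l.foldl (fun d c => d.modify (key c) [] (fun v => v ++ [val c])) d).getD k []
      = d.getD k [] ++ (l.filter (fun c => key c == k)).map val := by
  have h := PySem.Dict.getD_foldl_modify_append (l.map (fun c => (key c, val c))) d k
  simpa [List.foldl_map, List.filter_map, List.map_map, Function.comp] using h

theorem pv_items_group {β : Type} (l : List β) (key : β → Int) (val : β → List Int) :
    ((l.foldl (fun d c => d.modify (key c) [] (fun v => v ++ [val c])) PySem.Dict.empty).items)
      = (PySem.Set.ofList (l.map key)).map
          (fun k => (k, (l.filter (fun c => key c == k)).map val)) := by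
  have hnd : ((l.foldl (fun d c => d.modify (key c) [] (fun v => v ++ [val c]))
      PySem.Dict.empty).keys).Nodup := by
    apply PySem.Dict.nodup_keys_foldl_modify_key l key [] (fun d c => fun v => v ++ [val c])
    simp
  rw [PySem.Dict.items_eq_map_keys _ hnd [],
      PySem.Dict.keys_foldl_modify_key l key [] (fun d c => fun v => v ++ [val c])]
  simp only [PySem.Dict.keys_empty, PySem.Set.update_nil_left]
  apply List.map_congr_left
  intro k _
  rw [pv_getD_group]
  simp

theorem pv_popped (n : Int) (items : List (Int × List (List Int))) :
    items.foldl (fun acc kv => if ((kv.2.length : Int) < n) then acc ++ [kv.1] else acc) []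
      = (items.filter (fun kv => decide ((kv.2.length : Int) < n))).map Prod.fst := by
  simpa using PySem.List.foldl_append_if
    (fun kv : Int × List (List Int) => decide ((kv.2.length : Int) < n)) Prod.fst items []

theorem pv_contains_filter (S : List Int) (p : Int → Bool) (k : Int) (hk : k ∈ S) :
    (S.filter p).contains k = p k := by
  rw [List.contains_eq_mem]
  cases hp : p k <;> simp [List.mem_filter, hp, hk]

-- A's items after the pops: the keys of S whose group has length ≥ n, in S's order
theorem pv_A_shape (n : Int) (cs : List (List Int)) :
    (let solution := cs.foldl
        (fun d c => d.modify c.sum [] (· ++ [(PySem.List.slice? c none none (-1)).getD []]))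
        PySem.Dict.empty
     let popped := solution.items.foldl
        (fun acc kv => if (kv.2.length : Int) < n then acc ++ [kv.1] else acc) []
     (popped.foldl (fun d k => d.erase k) solution).items)
      = ((PySem.Set.ofList (cs.map List.sum)).filter
            (fun k => decide (n ≤ ((pvG cs k).length : Int)))).map
          (fun k => (k, pvG cs k)) := by
  simp only [PySem.List.slice?_none_none_neg_one, Option.getD_some]
  rw [pv_items_foldl_erase, pv_items_group cs List.sum List.reverse, pv_popped]
  simp only [List.filter_map, List.map_map, Function.comp_def, List.map_id']
  set S := PySem.Set.ofList (cs.map List.sum) with hS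
  have h1 : List.filter (fun x =>
        !(List.filter (fun k => decide ((((List.filter (fun c => c.sum == k) cs).map
            List.reverse).length : Int) < n)) S).contains x) S
      = List.filter (fun k => decide (n ≤ ((pvG cs k).length : Int))) S := by
    apply List.filter_congr
    intro x hx
    rw [pv_contains_filter S _ x hx, pvG]
    simp only [← decide_not, not_lt]
  rw [h1]
  apply List.map_congr_left
  intro k _
  rw [pvG]

-- ---- B-side shape lemma (conditional fresh inserts in increasing key order) ----

theorem pv_B_shape (n : Int) :
    generate_solutionset_alt n
      = ((PySem.List.pyRange 6 (6 * n - 2) 1).filter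
            (fun s => decide (n ≤ ((pvT n s).length : Int)))).map
          (fun s => (s, pvT n s)) := by
  show ((PySem.List.pyRange 6 (6 * n - 2) 1).foldl
      (fun d s => if n ≤ ((pvT n s).length : Int) then d.insert s (pvT n s) else d)
      PySem.Dict.empty).items = _
  rw [PySem.List.foldl_ite_eq_foldl_filter]
  rw [PySem.Dict.items_foldl_insert_fresh (k := fun s => s) (v := fun s => pvT n s)]
  · simp only [show (PySem.Dict.empty : PySem.Dict Int (List (List Int))).items = [] from rfl,
      List.nil_append]
  · intro a _; exact PySem.Dict.contains_empty a
  · simpa using (PySem.List.nodup_pyRange_one 6 (6 * n - 2)).filter _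

-- ---- values: B's arithmetic group construction equals A's filtered groups ----

-- filter an equality test over an integer range: at most one survivor
theorem pv_filter_eq_range (lo hi v : Int) :
    (PySem.List.pyRange lo hi 1).filter (fun x => x == v)
      = if lo ≤ v ∧ v < hi then [v] else [] := by
  rw [List.filter_beq]
  by_cases h : lo ≤ v ∧ v < hi
  · rw [if_pos h]
    have hv : v ∈ PySem.List.pyRange lo hi 1 := (PySem.List.mem_pyRange_one).2 h
    rw [List.count_eq_one_of_mem (PySem.List.nodup_pyRange_one lo hi) hv]
    rfl
  · rw [if_neg h]
    have hv : v ∉ PySem.List.pyRange lo hi 1 := fun hm =>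
      h ((PySem.List.mem_pyRange_one).1 hm)
    rw [List.count_eq_zero_of_not_mem hv]
    rfl

-- innermost comprehension level: the b-loop for a fixed first element a
theorem pv_T_level2 (top s a : Int) : ∀ (b : Int),
    (PySem.List.pyRange b (top + 1) 1).flatMap (fun b' =>
        if b' < s - a - b' ∧ s - a - b' ≤ top then [[s - a - b', b', a]] else [])
      = ((PySem.List.combinations (PySem.List.pyRange b (top + 1) 1) 2).filter
            (fun p => (a + p.sum) == s)).map (fun p => p.reverse ++ [a]) := by
  intro b
  by_cases hb : top + 1 ≤ b
  · rw [PySem.List.pyRange_one_eq_nil hb]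
    simp [PySem.List.combinations_nil_succ]
  · rw [not_le] at hb
    rw [PySem.List.pyRange_one_cons hb, List.flatMap_cons,
        PySem.List.combinations_cons_succ, PySem.List.combinations_one]
    have hrec := pv_T_level2 top s a (b + 1)
    rw [List.filter_append, List.map_append, ← hrec]
    congr 1
    -- the head block: c runs over the tail range, c = s - a - b forced
    rw [List.map_map, List.filter_map, List.map_map]
    have hpred : ((fun p : List Int => (a + p.sum) == s) ∘ (fun c => b :: c) ∘ (fun x : Int => [x]))
        = fun c => c == s - a - b := by
      funext c
      simp only [Function.comp, List.sum_cons, List.sum_nil]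
      cases hc : c == s - a - b
      · simp only [beq_eq_false_iff_ne] at hc ⊢; omega
      · simp only [beq_iff_eq] at hc ⊢; omega
    rw [hpred, pv_filter_eq_range]
    by_cases hc : b + 1 ≤ s - a - b ∧ s - a - b < top + 1
    · rw [if_pos hc, if_pos (by omega)]
      simp
    · rw [if_neg hc, if_neg (by omega)]
      simp
termination_by b => (top + 1 - b).toNat
decreasing_by omega

-- full comprehension: B's group for sum s = A's group restricted to sum s
theorem pv_T_level3 (top s : Int) : ∀ (a : Int),
    (PySem.List.pyRange a (top + 1) 1).flatMap (fun a' =>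
        (PySem.List.pyRange (a' + 1) (top + 1) 1).flatMap (fun b =>
          if b < s - a' - b ∧ s - a' - b ≤ top then [[s - a' - b, b, a']] else []))
      = ((PySem.List.combinations (PySem.List.pyRange a (top + 1) 1) 3).filter
            (fun c => c.sum == s)).map List.reverse := by
  intro a
  by_cases ha : top + 1 ≤ a
  · rw [PySem.List.pyRange_one_eq_nil ha]
    simp [PySem.List.combinations_nil_succ]
  · rw [not_le] at ha
    rw [PySem.List.pyRange_one_cons ha, List.flatMap_cons,
        PySem.List.combinations_cons_succ]
    have hrec := pv_T_level3 top s (a + 1)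
    rw [List.filter_append, List.map_append, ← hrec]
    congr 1
    rw [pv_T_level2 top s a (a + 1), List.filter_map, List.map_map]
    have hpred : ((fun c : List Int => c.sum == s) ∘ (fun p => a :: p))
        = fun p => (a + p.sum) == s := by
      funext p; simp [Function.comp]
    rw [hpred]
    apply List.map_congr_left
    intro p _
    simp
termination_by a => (top + 1 - a).toNat
decreasing_by omega

theorem pv_T_eq_G (n s : Int) :
    pvT n s = pvG (PySem.List.combinations (PySem.List.pyRange 1 (2 * n + 1) 1) 3) s := by
  have h := pv_T_level3 (2 * n) s 1
  rw [pvT, pvG]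
  rw [show (2 : Int) * n + 1 = (2 * n) + 1 from rfl]
  exact h

-- ---- keys: the first-appearance order of the sums is the increasing interval ----

theorem pv_map_add_pyRange (d lo hi : Int) :
    (PySem.List.pyRange lo hi 1).map (fun x => d + x)
      = PySem.List.pyRange (d + lo) (d + hi) 1 := by
  rw [PySem.List.pyRange_one, PySem.List.pyRange_one, List.map_map]
  rw [show d + hi - (d + lo) = hi - lo by ring]
  apply List.map_congr_left
  intro k _
  simp only [Function.comp]
  ring

theorem pv_filter_ge_range (lo hi m : Int) :
    (PySem.List.pyRange lo hi 1).filter (fun y => decide (m ≤ y))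
      = PySem.List.pyRange (max lo m) hi 1 := by
  by_cases h : hi ≤ lo
  · rw [PySem.List.pyRange_one_eq_nil h, PySem.List.pyRange_one_eq_nil (by omega)]
    rfl
  · rw [not_le] at h
    rw [PySem.List.pyRange_one_cons h]
    have hrec := pv_filter_ge_range (lo + 1) hi m
    by_cases hm : m ≤ lo
    · rw [List.filter_cons_of_pos (by simpa using hm), hrec,
          show max (lo + 1) m = lo + 1 by omega, show max lo m = lo by omega,
          ← PySem.List.pyRange_one_cons h]
    · rw [List.filter_cons_of_neg (by simpa using hm), hrec,
          show max (lo + 1) m = max lo m by omega]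
termination_by (hi - lo).toNat
decreasing_by omega

-- dedup (first-appearance set) of a map by an injective shift
theorem pv_ofList_map_add (d : Int) (l : List Int) :
    PySem.Set.ofList (l.map (fun x => d + x))
      = (PySem.Set.ofList l).map (fun x => d + x) := by
  induction l using List.reverseRecOn with
  | nil => rfl
  | append_singleton l x ih =>
      have hc : PySem.Set.contains ((PySem.Set.ofList l).map (fun x => d + x)) (d + x)
          = PySem.Set.contains (PySem.Set.ofList l) x := by
        simp [PySem.Set.contains, List.contains_eq_mem]
      rw [List.map_append, List.map_singleton, PySem.Set.ofList_append_singleton,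
          PySem.Set.ofList_append_singleton, ih]
      simp only [PySem.Set.add, hc]
      cases h : PySem.Set.contains (PySem.Set.ofList l) x <;> simp

-- sums of the 2-combinations of [b, M): all of [2b+1, 2M-2), in increasing first-appearance order
theorem pv_sums2 (M : Int) : ∀ (b : Int), b + 2 ≤ M →
    PySem.Set.ofList ((PySem.List.combinations (PySem.List.pyRange b M 1) 2).map List.sum)
      = PySem.List.pyRange (2 * b + 1) (2 * M - 2) 1 := by
  intro b hb
  rw [PySem.List.pyRange_one_cons (by omega), PySem.List.combinations_cons_succ,
      PySem.List.combinations_one, List.map_append, List.map_map, List.map_map]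
  rw [show (1 + 1 : Nat) = 2 from rfl]
  have h1 : ((List.sum ∘ fun c => b :: c) ∘ fun x : Int => [x]) = fun x : Int => b + x := by
    funext x; simp [Function.comp]
  rw [h1, pv_map_add_pyRange b (b + 1) M, PySem.Set.ofList_append,
      PySem.Set.ofList_eq_self_of_nodup _ (PySem.List.nodup_pyRange_one (b + (b + 1)) (b + M)),
      PySem.Set.update_eq_append_filter]
  by_cases hstep : b + 3 ≤ M
  · rw [pv_sums2 M (b + 1) (by omega)]
    have hcong : (PySem.List.pyRange (2 * (b + 1) + 1) (2 * M - 2) 1).filter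
          (fun y => !(PySem.Set.contains (PySem.List.pyRange (b + (b + 1)) (b + M) 1) y))
        = (PySem.List.pyRange (2 * (b + 1) + 1) (2 * M - 2) 1).filter
          (fun y => decide (b + M ≤ y)) := by
      apply List.filter_congr
      intro y hy
      rw [PySem.List.mem_pyRange_one] at hy
      simp only [PySem.Set.contains, List.contains_eq_mem, PySem.List.mem_pyRange_one,
        decide_eq_decide, ← decide_not, decide_eq_decide]
      omega
    rw [hcong, pv_filter_ge_range]
    rw [show max (2 * (b + 1) + 1) (b + M) = b + M by omega]
    rw [show b + (b + 1) = 2 * b + 1 by ring]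
    rw [← PySem.List.pyRange_one_append (2 * b + 1) (b + M) (2 * M - 2) (by omega) (by omega)]
  · -- last pair [b, b+1]: the tail has fewer than 2 elements
    have hM : M = b + 2 := by omega
    subst hM
    rw [PySem.List.combinations_eq_nil_of_length_lt
        (xs := PySem.List.pyRange (b + 1) (b + 2) 1) (r := 2)
        (by rw [PySem.List.length_pyRange_one]; omega)]
    simp only [List.map_nil, PySem.Set.ofList_nil, List.filter_nil, List.append_nil]
    rw [show b + (b + 1) = 2 * b + 1 by ring]
    rw [show b + (b + 2) = 2 * (b + 2) - 2 by ring]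
termination_by b => (M - b).toNat
decreasing_by omega

-- sums of the 3-combinations of [a, M): all of [3a+3, 3M-6], in increasing first-appearance order
theorem pv_sums3 (M : Int) : ∀ (a : Int), a + 3 ≤ M →
    PySem.Set.ofList ((PySem.List.combinations (PySem.List.pyRange a M 1) 3).map List.sum)
      = PySem.List.pyRange (3 * a + 3) (3 * M - 5) 1 := by
  intro a ha
  rw [PySem.List.pyRange_one_cons (by omega), PySem.List.combinations_cons_succ,
      List.map_append, List.map_map]
  rw [show (2 + 1 : Nat) = 3 from rfl]
  have h1 : (List.sum ∘ fun p : List Int => a :: p) = fun p => a + p.sum := by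
    funext p; simp [Function.comp]
  have h2 : ((PySem.List.combinations (PySem.List.pyRange (a + 1) M 1) 2).map
        (fun p => a + p.sum))
      = ((PySem.List.combinations (PySem.List.pyRange (a + 1) M 1) 2).map List.sum).map
        (fun x => a + x) := by
    rw [List.map_map]; rfl
  rw [h1, h2, PySem.Set.ofList_append, pv_ofList_map_add,
      pv_sums2 M (a + 1) (by omega), pv_map_add_pyRange, PySem.Set.update_eq_append_filter]
  by_cases hstep : a + 4 ≤ M
  · rw [pv_sums3 M (a + 1) (by omega)]
    have hcong : (PySem.List.pyRange (3 * (a + 1) + 3) (3 * M - 5) 1).filter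
          (fun y => !(PySem.Set.contains
            (PySem.List.pyRange (a + (2 * (a + 1) + 1)) (a + (2 * M - 2)) 1) y))
        = (PySem.List.pyRange (3 * (a + 1) + 3) (3 * M - 5) 1).filter
          (fun y => decide (a + (2 * M - 2) ≤ y)) := by
      apply List.filter_congr
      intro y hy
      rw [PySem.List.mem_pyRange_one] at hy
      simp only [PySem.Set.contains, List.contains_eq_mem, PySem.List.mem_pyRange_one,
        ← decide_not, decide_eq_decide]
      omega
    rw [hcong, pv_filter_ge_range]
    rw [show max (3 * (a + 1) + 3) (a + (2 * M - 2)) = a + (2 * M - 2) by omega]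
    rw [← PySem.List.pyRange_one_append (a + (2 * (a + 1) + 1)) (a + (2 * M - 2))
        (3 * M - 5) (by omega) (by omega)]
    congr 1
    omega
  · -- last triple: the tail [a+1, M) has fewer than 3 elements
    have hM : M = a + 3 := by omega
    subst hM
    rw [PySem.List.combinations_eq_nil_of_length_lt
        (xs := PySem.List.pyRange (a + 1) (a + 3) 1) (r := 3)
        (by rw [PySem.List.length_pyRange_one]; omega)]
    simp only [List.map_nil, PySem.Set.ofList_nil, List.filter_nil, List.append_nil]
    rw [show a + (2 * (a + 1) + 1) = 3 * a + 3 by ring]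
    rw [show a + (2 * (a + 3) - 2) = 3 * (a + 3) - 5 by ring]
termination_by a => (M - a).toNat
decreasing_by omega

-- ===== VERDICT (by name: the statement is the Claim_ definition above) =====
theorem generate_solutionset_spec : Claim_equal_generate_solutionset := by
  intro n _
  show generate_solutionset n = generate_solutionset_alt n
  rw [generate_solutionset, pv_A_shape, pv_B_shape]
  have hTG : ∀ s, pvT n s
      = pvG (PySem.List.combinations (PySem.List.pyRange 1 (2 * n + 1) 1) 3) s :=
    fun s => pv_T_eq_G n s
  have hfilter : ∀ l : List Int,
      l.filter (fun k => decide (n ≤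
          ((pvG (PySem.List.combinations (PySem.List.pyRange 1 (2 * n + 1) 1) 3) k).length : Int)))
        = l.filter (fun s => decide (n ≤ ((pvT n s).length : Int))) := by
    intro l
    apply List.filter_congr
    intro k _
    rw [hTG k]
  have hkeys : PySem.Set.ofList
        ((PySem.List.combinations (PySem.List.pyRange 1 (2 * n + 1) 1) 3).map List.sum)
      = PySem.List.pyRange 6 (6 * n - 2) 1 := by
    by_cases hn : 2 ≤ n
    · have h := pv_sums3 (2 * n + 1) 1 (by omega)
      rw [show (3 * (2 * n + 1) - 5 : Int) = 6 * n - 2 by ring] at h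
      rw [show (3 * 1 + 3 : Int) = 6 by norm_num] at h
      exact h
    · rw [PySem.List.combinations_eq_nil_of_length_lt
            (xs := PySem.List.pyRange 1 (2 * n + 1) 1) (r := 3)
            (by rw [PySem.List.length_pyRange_one]; omega),
          PySem.List.pyRange_one_eq_nil (a := 6) (b := 6 * n - 2) (by omega)]
      rfl
  rw [hkeys, hfilter]
  apply List.map_congr_left
  intro k _
  rw [hTG k]
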